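-- pv_equiv track=rewrite | github.com/austwel/advent-of-code | 2023/python/10/10.py | calculate_inside
-- ===== SOURCE A (Python) =====
-- def calculate_inside(map, locs) -> int:
--     total = 0
--     for line in range(len(map)):
--         if line not in locs.keys(): continue
--         count=False
--         for tile in range(len(map[0])):
--             if locs[line][tile]:
--                 if map[line][tile] in '|F7':
--                     count = not count
--             elif count:
--                 total += 1
--     return total
-- ===== SOURCE B (Python) =====
-- def calculate_inside(map, locs) -> int:
--     total = 0
--     if not map:
--         return 0
--     width = len(map[0])
--     for line in range(len(map)):
--         if line not in locs:
--             continue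
--         row = locs[line]
--         crossings = [t for t in range(width) if row[t] and map[line][t] in '|F7']
--         if len(crossings) % 2:
--             crossings.append(width)
--         for i in range(0, len(crossings), 2):
--             a, b = crossings[i], crossings[i + 1]
--             total += sum(1 for t in range(a + 1, b) if not row[t])
--     return total
-- ===== Notes on version B (the rewrite author's own statement) =====
-- stated objective: alternative
-- what changed: Replaces the per-tile parity flag scan by first collecting each row's ordered crossing columns and then summing the non-loop cells strictly inside each odd-parity interval, closing an unpaired final crossing at end-of-row.
import Mathlib
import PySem

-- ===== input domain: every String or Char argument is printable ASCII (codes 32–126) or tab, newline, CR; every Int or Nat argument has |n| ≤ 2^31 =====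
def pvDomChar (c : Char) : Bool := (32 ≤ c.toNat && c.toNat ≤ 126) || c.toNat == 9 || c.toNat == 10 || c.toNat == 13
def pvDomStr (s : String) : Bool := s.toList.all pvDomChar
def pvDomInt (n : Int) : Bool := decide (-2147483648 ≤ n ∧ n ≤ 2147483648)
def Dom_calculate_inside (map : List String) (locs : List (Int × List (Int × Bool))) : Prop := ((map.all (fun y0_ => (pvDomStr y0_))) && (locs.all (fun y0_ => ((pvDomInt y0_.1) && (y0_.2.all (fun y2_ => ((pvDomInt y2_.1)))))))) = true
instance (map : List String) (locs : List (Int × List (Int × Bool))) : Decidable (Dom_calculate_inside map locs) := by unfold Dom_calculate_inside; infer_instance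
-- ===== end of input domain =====

-- B replaces A's per-tile parity-flag scan by pairing each row's crossing columns into intervals
-- and counting the non-loop cells inside each; same cost, different decomposition ("alternative").

-- ===== PORT A =====
-- locs is a Python dict of dicts: ported with PySem.Dict.ofList / get? (getD defaults are only
-- reached where Python raises KeyError/IndexError, which Pre_ excludes).
def calculate_inside (map : List String) (locs : List (Int × List (Int × Bool))) : Int :=
  (PySem.List.pyRange 0 (PySem.List.len map) 1).foldl (fun total line =>
    if (PySem.Dict.ofList locs).contains line then
      ((PySem.List.pyRange 0 (PySem.Str.len (PySem.List.pyGetD map 0 "")) 1).foldl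
        (fun (st : Bool × Int) tile =>
          if ((PySem.Dict.ofList (((PySem.Dict.ofList locs).get? line).getD [])).get? tile).getD false then
            if PySem.Chars.isIn [(PySem.Str.pyGet? (PySem.List.pyGetD map line "") tile).getD ' '] ("|F7".toList)
            then (!st.1, st.2) else st
          else if st.1 then (st.1, st.2 + 1) else st)
        (false, total)).2
    else total) 0

-- ===== PORT B =====
-- sum(1 for t in range(a+1, b) if not row[t])
def pvCountGap (row : PySem.Dict Int Bool) (a b : Int) : Int :=
  ((PySem.List.pyRange (a + 1) b 1).countP (fun t => !((row.get? t).getD false)) : Int)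

-- the "for i in range(0, len(crossings), 2): a, b = crossings[i], crossings[i+1]" loop
def pvPairSum (row : PySem.Dict Int Bool) : List Int → Int
  | a :: b :: rest => pvCountGap row a b + pvPairSum row rest
  | _ => 0

def calculate_inside_alt (map : List String) (locs : List (Int × List (Int × Bool))) : Int :=
  if map = [] then 0
  else
    let width := PySem.Str.len (PySem.List.pyGetD map 0 "")
    (PySem.List.pyRange 0 (PySem.List.len map) 1).foldl (fun total line =>
      if (PySem.Dict.ofList locs).contains line then
        let row := PySem.Dict.ofList (((PySem.Dict.ofList locs).get? line).getD [])
        let cs := (PySem.List.pyRange 0 width 1).filter (fun t =>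
          ((row.get? t).getD false) &&
          PySem.Chars.isIn [(PySem.Str.pyGet? (PySem.List.pyGetD map line "") t).getD ' '] ("|F7".toList))
        let cs := if cs.length % 2 = 1 then cs ++ [width] else cs
        total + pvPairSum row cs
      else total) 0

-- ===== PRECONDITION & SPEC =====
-- Pre_ excludes exactly the inputs where Python A raises: a row of locs that is missing a tile key
-- in range(len(map[0])) (KeyError), or marks true a tile beyond that row's string (IndexError).
def Pre_calculate_inside (map : List String) (locs : List (Int × List (Int × Bool))) : Prop :=
  ∀ line ∈ List.range map.length, (PySem.Dict.ofList locs).contains (line : Int) = true →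
    ∀ tile ∈ List.range (map.headD "").toList.length,
      ∃ b, (PySem.Dict.ofList (((PySem.Dict.ofList locs).get? (line : Int)).getD [])).get? (tile : Int) = some b ∧
           (b = true → tile < (map.getD line "").toList.length)
instance (map : List String) (locs : List (Int × List (Int × Bool))) : Decidable (Pre_calculate_inside map locs) := by unfold Pre_calculate_inside; infer_instance

def pvWitness_calculate_inside : List String × (List (Int × List (Int × Bool))) :=
  (["F.7", "..."], [(0, [(0, true), (1, false), (2, true)])])

def Spec_calculate_inside (map : List String) (locs : List (Int × List (Int × Bool))) (out : Int) : Prop := out = calculate_inside_alt map locs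
instance (map : List String) (locs : List (Int × List (Int × Bool))) (out : Int) : Decidable (Spec_calculate_inside map locs out) := by unfold Spec_calculate_inside; infer_instance

-- ===== CLAIM (what is proved, stated in full; the proofs are below) =====
def Claim_equal_calculate_inside : Prop := ∀ (map : List String) (locs : List (Int × List (Int × Bool))), Dom_calculate_inside map locs → Pre_calculate_inside map locs → Spec_calculate_inside map locs (calculate_inside map locs)

-- ===== LEMMAS AND PROOFS =====

-- abstract per-row parity scan (A's inner loop with total split off)
def pvG (p q : Int → Bool) : List Int → Bool → Int
  | [], _ => 0
  | t :: ts, c => if p t then pvG p q ts (!c) else ((if c && q t then 1 else 0) + pvG p q ts c)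

def pvCnt (q : Int → Bool) (a b : Int) : Int := ((PySem.List.pyRange a b 1).countP q : Int)

-- interval semantics of the crossing list: parity true means "counting until the next crossing"
def pvF (q : Int → Bool) (w : Int) : Int → List Int → Bool → Int
  | a, [], c => if c then pvCnt q a w else 0
  | _, b :: rest, false => pvF q w (b + 1) rest true
  | a, b :: rest, true => pvCnt q a b + pvF q w (b + 1) rest false

theorem pvFoldA (r x : Int → Bool) : ∀ (ts : List Int) (c : Bool) (tot : Int),
    (ts.foldl (fun (st : Bool × Int) t =>
      if r t then (if x t then (!st.1, st.2) else st)
      else if st.1 then (st.1, st.2 + 1) else st) (c, tot)).2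
    = tot + pvG (fun t => r t && x t) (fun t => !r t) ts c := by
  intro ts
  induction ts with
  | nil => intro c tot; simp [pvG]
  | cons t ts ih =>
    intro c tot
    by_cases hr : r t <;> by_cases hx : x t <;> cases c <;>
      simp [pvG, hr, hx, ih] <;> ring

theorem pvCnt_cons (q : Int → Bool) (a b : Int) (h : a < b) :
    pvCnt q a b = (if q a then 1 else 0) + pvCnt q (a + 1) b := by
  rw [pvCnt, PySem.List.pyRange_one_cons h, List.countP_cons]
  by_cases hq : q a <;> simp [pvCnt, hq] <;> push_cast <;> ring

theorem pvF_shift (q : Int → Bool) (w a : Int) (cs : List Int) (c : Bool)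
    (hw : a < w) (hcs : ∀ b ∈ cs, a < b) :
    pvF q w a cs c = (if c && q a then 1 else 0) + pvF q w (a + 1) cs c := by
  cases cs with
  | nil => cases c <;> simp [pvF, pvCnt_cons q a w hw]
  | cons b rest =>
    have hb : a < b := hcs b (by simp)
    cases c <;> simp [pvF, pvCnt_cons q a b hb] <;> ring

theorem pvG_eq_pvF (p q : Int → Bool) (w : Int) : ∀ (n : Nat) (a : Int) (c : Bool),
    (w - a).toNat = n →
    pvG p q (PySem.List.pyRange a w 1) c = pvF q w a ((PySem.List.pyRange a w 1).filter p) c := by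
  intro n
  induction n with
  | zero =>
    intro a c h
    have hwa : w ≤ a := by omega
    rw [PySem.List.pyRange_one_eq_nil hwa]
    cases c <;> simp [pvG, pvF, pvCnt, PySem.List.pyRange_one_eq_nil hwa]
  | succ n ih =>
    intro a c h
    have haw : a < w := by omega
    have h' : (w - (a + 1)).toNat = n := by omega
    rw [PySem.List.pyRange_one_cons haw]
    by_cases hp : p a
    · have hnil : PySem.List.pyRange a a 1 = [] := PySem.List.pyRange_one_eq_nil le_rfl
      cases c <;>
        simp [pvG, pvF, hp, pvCnt, hnil, ih (a + 1) _ h']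
    · have hmem : ∀ b ∈ (PySem.List.pyRange (a + 1) w 1).filter p, a < b := by
        intro b hb
        have := (PySem.List.mem_pyRange_one).mp (List.mem_of_mem_filter hb)
        omega
      simp only [List.filter_cons, hp, if_false, Bool.false_eq_true]
      rw [pvF_shift q w a _ c haw hmem]
      simp [pvG, hp, ih (a + 1) _ h']

theorem pvF_eq_pairSum (row : PySem.Dict Int Bool) (w : Int) :
    ∀ (cs : List Int) (a : Int),
    pvF (fun t => !((row.get? t).getD false)) w a cs false
      = pvPairSum row (if cs.length % 2 = 1 then cs ++ [w] else cs)
  | [], a => by simp [pvF, pvPairSum]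
  | [b], a => by simp [pvF, pvPairSum, pvCountGap, pvCnt]
  | b :: b2 :: rest, a => by
    have ih := pvF_eq_pairSum row w rest (b2 + 1)
    have h2 : (rest.length + 1 + 1) % 2 = rest.length % 2 := by omega
    by_cases hodd : rest.length % 2 = 1 <;>
      simp [pvF, pvPairSum, pvCountGap, pvCnt, h2, hodd, ih]

-- one row: A's parity scan equals B's paired-crossings count
theorem pvRow (row : PySem.Dict Int Bool) (x : Int → Bool) (w tot : Int) :
    ((PySem.List.pyRange 0 w 1).foldl (fun (st : Bool × Int) t =>
        if (row.get? t).getD false then (if x t then (!st.1, st.2) else st)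
        else if st.1 then (st.1, st.2 + 1) else st) (false, tot)).2
    = tot + pvPairSum row
        (if ((PySem.List.pyRange 0 w 1).filter (fun t => (row.get? t).getD false && x t)).length % 2 = 1
         then ((PySem.List.pyRange 0 w 1).filter (fun t => (row.get? t).getD false && x t)) ++ [w]
         else ((PySem.List.pyRange 0 w 1).filter (fun t => (row.get? t).getD false && x t))) := by
  rw [pvFoldA (fun t => (row.get? t).getD false) x]
  rw [pvG_eq_pvF _ _ w (w - 0).toNat 0 false rfl]
  rw [pvF_eq_pairSum row w]

theorem pvPorts_eq (map : List String) (locs : List (Int × List (Int × Bool))) :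
    calculate_inside map locs = calculate_inside_alt map locs := by
  unfold calculate_inside calculate_inside_alt
  by_cases hm : map = []
  · subst hm
    simp [PySem.List.pyRange_one_eq_nil le_rfl]
  · rw [if_neg hm]
    apply PySem.List.foldl_congr_mem
    intro total line _
    by_cases hc : (PySem.Dict.ofList locs).contains line
    · simp only [hc, if_true]
      exact pvRow _ _ _ _
    · simp [hc]

-- ===== VERDICT (by name: the statement is the Claim_ definition above) =====
theorem calculate_inside_spec : Claim_equal_calculate_inside := by
  intro map locs _ _
  unfold Spec_calculate_inside
  exact pvPorts_eq map locs
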